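-- pv_equiv track=rewrite | github.com/gabrielsluz/SlowFast | slowfast/datasets/clevrer_dual.py | string_to_token_list
-- ===== SOURCE A (Python) =====
-- def string_to_token_list(text):
--     text = text.lower()
--     new_text = ''
--     for c in text:
--         if c.isalnum():
--             new_text += c
--         else:
--             new_text += ' '
--             new_text += c
--     text_split = new_text.split()
--     return text_split
-- ===== SOURCE B (Python) =====
-- def string_to_token_list(text):
--     # single pass with a token buffer: no intermediate spaced string, no .split()
--     tokens = []
--     buf = ''
--     for c in text.lower():
--         if c.isalnum():
--             buf += c
--         else:
--             if buf:
--                 tokens.append(buf)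
--             buf = '' if c.isspace() else c
--     if buf:
--         tokens.append(buf)
--     return tokens
-- ===== Notes on version B (the rewrite author's own statement) =====
-- stated objective: simpler
-- what changed: Replaces A's build-a-space-padded-copy-then-split() strategy with a single direct grouping pass that maintains a token buffer and emits tokens on the fly, with no intermediate string and no split.
import Mathlib
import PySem

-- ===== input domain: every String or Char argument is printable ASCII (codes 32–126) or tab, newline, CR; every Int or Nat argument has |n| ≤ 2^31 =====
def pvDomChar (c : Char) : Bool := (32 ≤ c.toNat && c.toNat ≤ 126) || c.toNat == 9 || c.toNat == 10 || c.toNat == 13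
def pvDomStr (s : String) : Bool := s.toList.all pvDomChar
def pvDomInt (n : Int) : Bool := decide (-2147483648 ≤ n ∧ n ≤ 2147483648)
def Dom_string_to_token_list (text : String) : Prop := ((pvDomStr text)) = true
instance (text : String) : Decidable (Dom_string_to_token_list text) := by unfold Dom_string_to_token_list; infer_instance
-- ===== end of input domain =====

-- B replaces A's "insert spaces then split()" with a single buffered grouping pass (no intermediate string); same tokens, same cost.


-- ===== PORT A =====
-- A: lowercase; build new_text by appending each alnum char as is, and ' ' then c for each non-alnum char; return new_text.split()
def string_to_token_list (text : String) : List String :=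
  let t := (PySem.Str.lower text).toList
  let newText := t.foldl (fun acc c =>
    if PySem.Chars.isalnum c then acc ++ [c] else (acc ++ [' ']) ++ [c]) []
  (PySem.Chars.split₀ newText).map String.ofList

-- ===== PORT B =====
-- B: one pass with a token buffer (buf += c / flush on non-alnum); tokens kept as List Char, converted to String at the end
def string_to_token_list_alt (text : String) : List String :=
  let step := fun (st : List (List Char) × List Char) (c : Char) =>
    if PySem.Chars.isalnum c then (st.1, st.2 ++ [c])
    else
      ((if st.2 ≠ [] then st.1 ++ [st.2] else st.1),
       if PySem.Chars.isspace c then [] else [c])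
  let st := (PySem.Str.lower text).toList.foldl step ([], [])
  (if st.2 ≠ [] then st.1 ++ [st.2] else st.1).map String.ofList

-- ===== PRECONDITION & SPEC =====
def Spec_string_to_token_list (text : String) (out : List String) : Prop := out = string_to_token_list_alt text
instance (text : String) (out : List String) : Decidable (Spec_string_to_token_list text out) := by unfold Spec_string_to_token_list; infer_instance

-- ===== CLAIM (what is proved, stated in full; the proofs are below) =====
def Claim_equal_string_to_token_list : Prop := ∀ (text : String), Dom_string_to_token_list text → Spec_string_to_token_list text (string_to_token_list text)

-- ===== LEMMAS AND PROOFS =====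

-- the per-character expansion A's loop performs
def pvExpand (c : Char) : List Char :=
  if PySem.Chars.isalnum c then [c] else [' ', c]

-- B's per-character step and final flush (same bodies as in string_to_token_list_alt)
def pvStep (st : List (List Char) × List Char) (c : Char) : List (List Char) × List Char :=
  if PySem.Chars.isalnum c then (st.1, st.2 ++ [c])
  else
    ((if st.2 ≠ [] then st.1 ++ [st.2] else st.1),
     if PySem.Chars.isspace c then [] else [c])

def pvFinish (st : List (List Char) × List Char) : List (List Char) :=
  if st.2 ≠ [] then st.1 ++ [st.2] else st.1

-- defining equations of split₀'s worker
theorem pv_go_nil (cur : List Char) (acc : List (List Char)) :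
    PySem.Chars.split₀.go [] cur acc =
      (if cur.isEmpty then acc.reverse else (cur.reverse :: acc).reverse) := rfl

theorem pv_go_cons (c : Char) (rest cur : List Char) (acc : List (List Char)) :
    PySem.Chars.split₀.go (c :: rest) cur acc =
      (if PySem.Chars.isspace c then
        (if cur.isEmpty then PySem.Chars.split₀.go rest [] acc
         else PySem.Chars.split₀.go rest [] (cur.reverse :: acc))
       else PySem.Chars.split₀.go rest (c :: cur) acc) := rfl

-- alphanumeric characters are never whitespace (the code-point ranges are disjoint)
theorem pv_alnum_not_space (c : Char) (h : PySem.Chars.isalnum c = true) :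
    PySem.Chars.isspace c = false := by
  simp only [PySem.Chars.isalnum, PySem.Chars.isalpha, PySem.Chars.isdigit,
        PySem.Chars.isupper, PySem.Chars.islower,
        Bool.or_eq_true, Bool.and_eq_true, decide_eq_true_eq,
        Char.le_def, UInt32.le_iff_toNat_le] at h
  simp only [PySem.Chars.isspace, Bool.or_eq_false_iff, Bool.and_eq_false_iff,
        decide_eq_false_iff_not, Char.toNat] at h ⊢
  have e1 : ('0' : Char).val.toNat = 48 := rfl
  have e2 : ('9' : Char).val.toNat = 57 := rfl
  have e3 : ('A' : Char).val.toNat = 65 := rfl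
  have e4 : ('Z' : Char).val.toNat = 90 := rfl
  have e5 : ('a' : Char).val.toNat = 97 := rfl
  have e6 : ('z' : Char).val.toNat = 122 := rfl
  rw [e1, e2, e3, e4, e5, e6] at h
  omega

-- split₀'s worker run over A's expanded stream computes B's buffered fold
theorem pv_go_eq (cs : List Char) (toks : List (List Char)) (buf : List Char) :
    PySem.Chars.split₀.go (cs.flatMap pvExpand) buf.reverse toks.reverse =
      pvFinish (cs.foldl pvStep (toks, buf)) := by
  induction cs generalizing toks buf with
  | nil =>
    rw [List.flatMap_nil, pv_go_nil, List.foldl_nil]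
    rcases buf with _ | ⟨b, bs⟩ <;> simp [pvFinish]
  | cons c cs ih =>
    rw [List.flatMap_cons, List.foldl_cons]
    by_cases ha : PySem.Chars.isalnum c = true
    · have hs := pv_alnum_not_space c ha
      rw [show pvExpand c = [c] from by simp [pvExpand, ha], List.singleton_append,
        pv_go_cons, hs]
      simp only [Bool.false_eq_true, if_false]
      rw [show pvStep (toks, buf) c = (toks, buf ++ [c]) from by simp [pvStep, ha],
        show (c :: buf.reverse) = (buf ++ [c]).reverse from by simp]
      exact ih toks (buf ++ [c])
    · have ha' : PySem.Chars.isalnum c = false := eq_false_of_ne_true ha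
      rw [show pvExpand c = [' ', c] from by simp [pvExpand, ha'],
        show ([' ', c] ++ cs.flatMap pvExpand) = ' ' :: c :: cs.flatMap pvExpand from rfl,
        pv_go_cons, show PySem.Chars.isspace ' ' = true from rfl]
      simp only [if_true]
      by_cases hsc : PySem.Chars.isspace c = true
      · rw [show pvStep (toks, buf) c =
            ((if buf ≠ [] then toks ++ [buf] else toks), []) from by simp [pvStep, ha', hsc]]
        rcases buf with _ | ⟨b, bs⟩
        · simp only [List.reverse_nil, List.isEmpty_nil, if_true, ne_eq, not_true_eq_false,
            if_false]
          rw [pv_go_cons, hsc]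
          simp only [if_true, List.isEmpty_nil]
          simpa using ih toks []
        · rw [if_neg (by simp)]
          simp only [List.reverse_reverse]
          rw [pv_go_cons, hsc]
          simp only [if_true, List.isEmpty_nil]
          rw [if_pos (by simp)]
          simpa using ih (toks ++ [b :: bs]) []
      · have hsc' : PySem.Chars.isspace c = false := eq_false_of_ne_true hsc
        rw [show pvStep (toks, buf) c =
            ((if buf ≠ [] then toks ++ [buf] else toks), [c]) from by simp [pvStep, ha', hsc']]
        rcases buf with _ | ⟨b, bs⟩
        · simp only [List.reverse_nil, List.isEmpty_nil, if_true, ne_eq, not_true_eq_false,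
            if_false]
          rw [pv_go_cons, hsc']
          simp only [Bool.false_eq_true, if_false]
          simpa using ih toks [c]
        · rw [if_neg (by simp)]
          simp only [List.reverse_reverse]
          rw [pv_go_cons, hsc']
          simp only [Bool.false_eq_true, if_false]
          rw [if_pos (by simp)]
          simpa using ih (toks ++ [b :: bs]) [c]
  
-- ===== VERDICT (by name: the statement is the Claim_ definition above) =====
theorem string_to_token_list_spec : Claim_equal_string_to_token_list := by
  intro text _
  unfold Spec_string_to_token_list string_to_token_list string_to_token_list_alt
  simp only []
  rw [show (fun (acc : List Char) (c : Char) =>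
        if PySem.Chars.isalnum c then acc ++ [c] else (acc ++ [' ']) ++ [c]) =
      (fun acc c => acc ++ pvExpand c) from by
        funext acc c
        by_cases h : PySem.Chars.isalnum c = true <;> simp [pvExpand, h]]
  rw [PySem.List.foldl_append_eq_flatMap, List.nil_append, PySem.Chars.split₀]
  have h := pv_go_eq ((PySem.Str.lower text).toList) [] []
  simp only [List.reverse_nil] at h
  rw [h]
  rfl
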